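-- pv_equiv track=rewrite | github.com/sgroy10/jewelclaw | app/services/whatsapp_service.py | detect_timezone_from_phone
-- ===== SOURCE A (Python) =====
-- def detect_timezone_from_phone(phone: str) -> str:
--     """Detect timezone from phone number country code."""
--     phone = phone.replace("whatsapp:", "").replace("+", "").replace(" ", "").replace("-", "")
--
--     # Country code -> timezone mapping (most common codes)
--     PHONE_TIMEZONE_MAP = [
--         ("91", "Asia/Kolkata"),       # India
--         ("1", "America/New_York"),    # US/Canada (default ET)
--         ("44", "Europe/London"),      # UK
--         ("971", "Asia/Dubai"),        # UAE
--         ("966", "Asia/Riyadh"),       # Saudi Arabia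
--         ("65", "Asia/Singapore"),     # Singapore
--         ("60", "Asia/Kuala_Lumpur"),  # Malaysia
--         ("852", "Asia/Hong_Kong"),    # Hong Kong
--         ("61", "Australia/Sydney"),   # Australia
--         ("64", "Pacific/Auckland"),   # New Zealand
--         ("49", "Europe/Berlin"),      # Germany
--         ("33", "Europe/Paris"),       # France
--         ("39", "Europe/Rome"),        # Italy
--         ("81", "Asia/Tokyo"),         # Japan
--         ("86", "Asia/Shanghai"),      # China
--         ("82", "Asia/Seoul"),         # South Korea
--         ("66", "Asia/Bangkok"),       # Thailand
--         ("62", "Asia/Jakarta"),       # Indonesia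
--         ("63", "Asia/Manila"),        # Philippines
--         ("92", "Asia/Karachi"),       # Pakistan
--         ("94", "Asia/Colombo"),       # Sri Lanka
--         ("880", "Asia/Dhaka"),        # Bangladesh
--         ("977", "Asia/Kathmandu"),    # Nepal
--         ("974", "Asia/Qatar"),        # Qatar
--         ("968", "Asia/Muscat"),       # Oman
--         ("973", "Asia/Bahrain"),      # Bahrain
--         ("965", "Asia/Kuwait"),       # Kuwait
--         ("254", "Africa/Nairobi"),    # Kenya
--         ("27", "Africa/Johannesburg"),# South Africa
--         ("234", "Africa/Lagos"),      # Nigeria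
--         ("7", "Europe/Moscow"),       # Russia
--         ("55", "America/Sao_Paulo"),  # Brazil
--         ("52", "America/Mexico_City"),# Mexico
--     ]
--
--     # Match longest prefix first (e.g., 880 before 88)
--     for prefix, tz in sorted(PHONE_TIMEZONE_MAP, key=lambda x: -len(x[0])):
--         if phone.startswith(prefix):
--             return tz
--
--     return "Asia/Kolkata"  # Default to IST
-- ===== SOURCE B (Python) =====
-- def detect_timezone_from_phone(phone: str) -> str:
--     """Detect timezone from phone country code via a decision tree on the leading digits."""
--     phone = phone.replace("whatsapp:", "").replace("+", "").replace(" ", "").replace("-", "")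
--     c = phone[:1]
--     if c == "1":
--         return "America/New_York"
--     if c == "7":
--         return "Europe/Moscow"
--     if c == "2":
--         t3 = phone[:3]
--         if t3 == "254":
--             return "Africa/Nairobi"
--         if t3 == "234":
--             return "Africa/Lagos"
--         if phone[:2] == "27":
--             return "Africa/Johannesburg"
--         return "Asia/Kolkata"
--     if c == "3":
--         t2 = phone[:2]
--         if t2 == "33":
--             return "Europe/Paris"
--         if t2 == "39":
--             return "Europe/Rome"
--         return "Asia/Kolkata"
--     if c == "4":
--         t2 = phone[:2]
--         if t2 == "44":
--             return "Europe/London"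
--         if t2 == "49":
--             return "Europe/Berlin"
--         return "Asia/Kolkata"
--     if c == "5":
--         t2 = phone[:2]
--         if t2 == "55":
--             return "America/Sao_Paulo"
--         if t2 == "52":
--             return "America/Mexico_City"
--         return "Asia/Kolkata"
--     if c == "6":
--         t2 = phone[:2]
--         if t2 == "65":
--             return "Asia/Singapore"
--         if t2 == "60":
--             return "Asia/Kuala_Lumpur"
--         if t2 == "61":
--             return "Australia/Sydney"
--         if t2 == "64":
--             return "Pacific/Auckland"
--         if t2 == "66":
--             return "Asia/Bangkok"
--         if t2 == "62":
--             return "Asia/Jakarta"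
--         if t2 == "63":
--             return "Asia/Manila"
--         return "Asia/Kolkata"
--     if c == "8":
--         t3 = phone[:3]
--         if t3 == "852":
--             return "Asia/Hong_Kong"
--         if t3 == "880":
--             return "Asia/Dhaka"
--         t2 = phone[:2]
--         if t2 == "81":
--             return "Asia/Tokyo"
--         if t2 == "86":
--             return "Asia/Shanghai"
--         if t2 == "82":
--             return "Asia/Seoul"
--         return "Asia/Kolkata"
--     if c == "9":
--         t3 = phone[:3]
--         if t3 == "971":
--             return "Asia/Dubai"
--         if t3 == "966":
--             return "Asia/Riyadh"
--         if t3 == "977":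
--             return "Asia/Kathmandu"
--         if t3 == "974":
--             return "Asia/Qatar"
--         if t3 == "968":
--             return "Asia/Muscat"
--         if t3 == "973":
--             return "Asia/Bahrain"
--         if t3 == "965":
--             return "Asia/Kuwait"
--         t2 = phone[:2]
--         if t2 == "91":
--             return "Asia/Kolkata"
--         if t2 == "92":
--             return "Asia/Karachi"
--         if t2 == "94":
--             return "Asia/Colombo"
--         return "Asia/Kolkata"
--     return "Asia/Kolkata"
-- ===== Notes on version B (the rewrite author's own statement) =====
-- stated objective: alternative
-- what changed: Replaces A's per-call sort of the 33-entry prefix table plus a linear startswith scan with a hand-rolled decision tree: branch on the first digit, then compare the 3- and 2-character slices only against the few prefixes of that branch, with the same default fallback.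
import Mathlib
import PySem

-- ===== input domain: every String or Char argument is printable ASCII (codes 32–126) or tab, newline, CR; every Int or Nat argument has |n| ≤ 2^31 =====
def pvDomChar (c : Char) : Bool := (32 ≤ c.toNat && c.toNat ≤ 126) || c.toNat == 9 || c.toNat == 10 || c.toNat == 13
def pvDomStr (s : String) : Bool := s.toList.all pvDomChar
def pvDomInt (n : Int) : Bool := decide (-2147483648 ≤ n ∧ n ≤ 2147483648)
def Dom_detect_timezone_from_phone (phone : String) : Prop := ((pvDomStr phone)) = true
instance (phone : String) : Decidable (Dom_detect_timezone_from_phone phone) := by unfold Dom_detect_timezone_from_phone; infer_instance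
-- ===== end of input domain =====

-- B replaces A's per-call sort of the prefix table plus a linear startswith scan by a
-- decision tree on the leading digits (objective: alternative; no speed claim). The identical
-- Python cleaning line of both programs is ported once as pvClean.

-- ===== PORT A =====
def pvClean (phone : String) : String :=
  PySem.Str.replace (PySem.Str.replace (PySem.Str.replace
    (PySem.Str.replace phone "whatsapp:" "") "+" "") " " "") "-" ""

-- A's PHONE_TIMEZONE_MAP, in source order
def pvPhoneTimezoneMap : List (String × String) :=
  [("91", "Asia/Kolkata"),
   ("1", "America/New_York"),
   ("44", "Europe/London"),
   ("971", "Asia/Dubai"),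
   ("966", "Asia/Riyadh"),
   ("65", "Asia/Singapore"),
   ("60", "Asia/Kuala_Lumpur"),
   ("852", "Asia/Hong_Kong"),
   ("61", "Australia/Sydney"),
   ("64", "Pacific/Auckland"),
   ("49", "Europe/Berlin"),
   ("33", "Europe/Paris"),
   ("39", "Europe/Rome"),
   ("81", "Asia/Tokyo"),
   ("86", "Asia/Shanghai"),
   ("82", "Asia/Seoul"),
   ("66", "Asia/Bangkok"),
   ("62", "Asia/Jakarta"),
   ("63", "Asia/Manila"),
   ("92", "Asia/Karachi"),
   ("94", "Asia/Colombo"),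
   ("880", "Asia/Dhaka"),
   ("977", "Asia/Kathmandu"),
   ("974", "Asia/Qatar"),
   ("968", "Asia/Muscat"),
   ("973", "Asia/Bahrain"),
   ("965", "Asia/Kuwait"),
   ("254", "Africa/Nairobi"),
   ("27", "Africa/Johannesburg"),
   ("234", "Africa/Lagos"),
   ("7", "Europe/Moscow"),
   ("55", "America/Sao_Paulo"),
   ("52", "America/Mexico_City")]

-- A's for-loop with early return over the sorted pairs
def pvScanA (phone : String) : List (String × String) → String
  | [] => "Asia/Kolkata"
  | (prefix_, tz) :: rest =>
      if PySem.Str.startswith phone prefix_ then tz else pvScanA phone rest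

def detect_timezone_from_phone (phone : String) : String :=
  let phone := pvClean phone
  pvScanA phone (PySem.List.sorted pvPhoneTimezoneMap (fun x => -(PySem.Str.len x.1 : Int)) false)

-- ===== PORT B =====
def detect_timezone_from_phone_alt (phone : String) : String :=
  let phone := pvClean phone
  let c := PySem.Str.slice phone none (some 1)
  if c == "1" then "America/New_York"
  else if c == "7" then "Europe/Moscow"
  else if c == "2" then
    let t3 := PySem.Str.slice phone none (some 3)
    if t3 == "254" then "Africa/Nairobi"
    else if t3 == "234" then "Africa/Lagos"
    else if PySem.Str.slice phone none (some 2) == "27" then "Africa/Johannesburg"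
    else "Asia/Kolkata"
  else if c == "3" then
    let t2 := PySem.Str.slice phone none (some 2)
    if t2 == "33" then "Europe/Paris"
    else if t2 == "39" then "Europe/Rome"
    else "Asia/Kolkata"
  else if c == "4" then
    let t2 := PySem.Str.slice phone none (some 2)
    if t2 == "44" then "Europe/London"
    else if t2 == "49" then "Europe/Berlin"
    else "Asia/Kolkata"
  else if c == "5" then
    let t2 := PySem.Str.slice phone none (some 2)
    if t2 == "55" then "America/Sao_Paulo"
    else if t2 == "52" then "America/Mexico_City"
    else "Asia/Kolkata"
  else if c == "6" then
    let t2 := PySem.Str.slice phone none (some 2)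
    if t2 == "65" then "Asia/Singapore"
    else if t2 == "60" then "Asia/Kuala_Lumpur"
    else if t2 == "61" then "Australia/Sydney"
    else if t2 == "64" then "Pacific/Auckland"
    else if t2 == "66" then "Asia/Bangkok"
    else if t2 == "62" then "Asia/Jakarta"
    else if t2 == "63" then "Asia/Manila"
    else "Asia/Kolkata"
  else if c == "8" then
    let t3 := PySem.Str.slice phone none (some 3)
    if t3 == "852" then "Asia/Hong_Kong"
    else if t3 == "880" then "Asia/Dhaka"
    else
      let t2 := PySem.Str.slice phone none (some 2)
      if t2 == "81" then "Asia/Tokyo"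
      else if t2 == "86" then "Asia/Shanghai"
      else if t2 == "82" then "Asia/Seoul"
      else "Asia/Kolkata"
  else if c == "9" then
    let t3 := PySem.Str.slice phone none (some 3)
    if t3 == "971" then "Asia/Dubai"
    else if t3 == "966" then "Asia/Riyadh"
    else if t3 == "977" then "Asia/Kathmandu"
    else if t3 == "974" then "Asia/Qatar"
    else if t3 == "968" then "Asia/Muscat"
    else if t3 == "973" then "Asia/Bahrain"
    else if t3 == "965" then "Asia/Kuwait"
    else
      let t2 := PySem.Str.slice phone none (some 2)
      if t2 == "91" then "Asia/Kolkata"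
      else if t2 == "92" then "Asia/Karachi"
      else if t2 == "94" then "Asia/Colombo"
      else "Asia/Kolkata"
  else "Asia/Kolkata"

-- ===== PRECONDITION & SPEC =====
def Spec_detect_timezone_from_phone (phone : String) (out : String) : Prop := out = detect_timezone_from_phone_alt phone
instance (phone : String) (out : String) : Decidable (Spec_detect_timezone_from_phone phone out) := by unfold Spec_detect_timezone_from_phone; infer_instance

-- ===== CLAIM (what is proved, stated in full; the proofs are below) =====
def Claim_equal_detect_timezone_from_phone : Prop := ∀ (phone : String), Dom_detect_timezone_from_phone phone → Spec_detect_timezone_from_phone phone (detect_timezone_from_phone phone)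

-- ===== LEMMAS AND PROOFS =====

-- startswith on an ofList-string, phrased as list prefix
theorem sw_startswith_prefix (l : List Char) (p : String) :
    PySem.Str.startswith (String.ofList l) p = decide (p.toList <+: l) := by
  have h := PySem.Chars.startswith_iff (String.ofList l).toList p.toList
  simp only [String.toList_ofList] at h
  cases hb : PySem.Chars.startswith l p.toList
  · simp [PySem.Str.startswith, hb] at h ⊢; simpa using h
  · simp [PySem.Str.startswith, hb] at h ⊢; simpa using h

-- String == as equality of character lists
theorem beq_eq_toList (p q : String) : (p == q) = decide (p.toList = q.toList) := by
  cases hb : p == q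
  · simp at hb ⊢; intro h; exact hb (String.toList_inj.mp h)
  · simp at hb ⊢; exact congrArg _ hb

-- phone[:n] as a take on the character list
theorem pvSlice3 (s : String) : PySem.Str.slice s none (some 3) = String.ofList (s.toList.take 3) := by
  simp [PySem.Str.slice, PySem.List.slice_to _ (by omega : (0:Int) ≤ 3)]
theorem pvSlice2 (s : String) : PySem.Str.slice s none (some 2) = String.ofList (s.toList.take 2) := by
  simp [PySem.Str.slice, PySem.List.slice_to _ (by omega : (0:Int) ≤ 2)]
theorem pvSlice1 (s : String) : PySem.Str.slice s none (some 1) = String.ofList (s.toList.take 1) := by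
  simp [PySem.Str.slice, PySem.List.slice_to _ (by omega : (0:Int) ≤ 1)]

-- A's sorted(...) call, evaluated: 3-character prefixes first, then 2, then 1, stably
theorem pvSorted_eval : PySem.List.sorted pvPhoneTimezoneMap (fun x => -(PySem.Str.len x.1 : Int)) false =
    [("971", "Asia/Dubai"), ("966", "Asia/Riyadh"), ("852", "Asia/Hong_Kong"), ("880", "Asia/Dhaka"), ("977", "Asia/Kathmandu"), ("974", "Asia/Qatar"), ("968", "Asia/Muscat"), ("973", "Asia/Bahrain"), ("965", "Asia/Kuwait"), ("254", "Africa/Nairobi"), ("234", "Africa/Lagos"), ("91", "Asia/Kolkata"), ("44", "Europe/London"), ("65", "Asia/Singapore"), ("60", "Asia/Kuala_Lumpur"), ("61", "Australia/Sydney"), ("64", "Pacific/Auckland"), ("49", "Europe/Berlin"), ("33", "Europe/Paris"), ("39", "Europe/Rome"), ("81", "Asia/Tokyo"), ("86", "Asia/Shanghai"), ("82", "Asia/Seoul"), ("66", "Asia/Bangkok"), ("62", "Asia/Jakarta"), ("63", "Asia/Manila"), ("92", "Asia/Karachi"), ("94", "Asia/Colombo"), ("27", "Africa/Johannesburg"),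 ("55", "America/Sao_Paulo"), ("52", "America/Mexico_City"), ("1", "America/New_York"), ("7", "Europe/Moscow")] := by decide


-- A's sorted scan equals B's decision tree, on a cleaned string of this shape
theorem pvShape3 (a b d : Char) (t : List Char) :
    pvScanA (String.ofList (a::b::d::t)) (PySem.List.sorted pvPhoneTimezoneMap (fun x => -(PySem.Str.len x.1 : Int)) false)
      = (fun phone => 
          let c := PySem.Str.slice phone none (some 1)
          if c == "1" then "America/New_York"
          else if c == "7" then "Europe/Moscow"
          else if c == "2" then
            let t3 := PySem.Str.slice phone none (some 3)
            if t3 == "254" then "Africa/Nairobi"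
            else if t3 == "234" then "Africa/Lagos"
            else if PySem.Str.slice phone none (some 2) == "27" then "Africa/Johannesburg"
            else "Asia/Kolkata"
          else if c == "3" then
            let t2 := PySem.Str.slice phone none (some 2)
            if t2 == "33" then "Europe/Paris"
            else if t2 == "39" then "Europe/Rome"
            else "Asia/Kolkata"
          else if c == "4" then
            let t2 := PySem.Str.slice phone none (some 2)
            if t2 == "44" then "Europe/London"
            else if t2 == "49" then "Europe/Berlin"
            else "Asia/Kolkata"
          else if c == "5" then
            let t2 := PySem.Str.slice phone none (some 2)
            if t2 == "55" then "America/Sao_Paulo"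
            else if t2 == "52" then "America/Mexico_City"
            else "Asia/Kolkata"
          else if c == "6" then
            let t2 := PySem.Str.slice phone none (some 2)
            if t2 == "65" then "Asia/Singapore"
            else if t2 == "60" then "Asia/Kuala_Lumpur"
            else if t2 == "61" then "Australia/Sydney"
            else if t2 == "64" then "Pacific/Auckland"
            else if t2 == "66" then "Asia/Bangkok"
            else if t2 == "62" then "Asia/Jakarta"
            else if t2 == "63" then "Asia/Manila"
            else "Asia/Kolkata"
          else if c == "8" then
            let t3 := PySem.Str.slice phone none (some 3)
            if t3 == "852" then "Asia/Hong_Kong"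
            else if t3 == "880" then "Asia/Dhaka"
            else
              let t2 := PySem.Str.slice phone none (some 2)
              if t2 == "81" then "Asia/Tokyo"
              else if t2 == "86" then "Asia/Shanghai"
              else if t2 == "82" then "Asia/Seoul"
              else "Asia/Kolkata"
          else if c == "9" then
            let t3 := PySem.Str.slice phone none (some 3)
            if t3 == "971" then "Asia/Dubai"
            else if t3 == "966" then "Asia/Riyadh"
            else if t3 == "977" then "Asia/Kathmandu"
            else if t3 == "974" then "Asia/Qatar"
            else if t3 == "968" then "Asia/Muscat"
            else if t3 == "973" then "Asia/Bahrain"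
            else if t3 == "965" then "Asia/Kuwait"
            else
              let t2 := PySem.Str.slice phone none (some 2)
              if t2 == "91" then "Asia/Kolkata"
              else if t2 == "92" then "Asia/Karachi"
              else if t2 == "94" then "Asia/Colombo"
              else "Asia/Kolkata"
          else "Asia/Kolkata") (String.ofList (a::b::d::t)) := by
  simp only [pvSorted_eval, pvSlice1, pvSlice2, pvSlice3, String.toList_ofList,
    List.take_succ_cons, List.take_zero]
  simp only [pvScanA, sw_startswith_prefix, beq_eq_toList, String.toList_ofList,
    decide_eq_true_eq, List.cons_prefix_cons, List.nil_prefix, List.cons.injEq,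
    show ("1" : String).toList = ['1'] from rfl,
      show ("7" : String).toList = ['7'] from rfl,
      show ("2" : String).toList = ['2'] from rfl,
      show ("3" : String).toList = ['3'] from rfl,
      show ("4" : String).toList = ['4'] from rfl,
      show ("5" : String).toList = ['5'] from rfl,
      show ("6" : String).toList = ['6'] from rfl,
      show ("8" : String).toList = ['8'] from rfl,
      show ("9" : String).toList = ['9'] from rfl,
      show ("91" : String).toList = ['9', '1'] from rfl,
      show ("44" : String).toList = ['4', '4'] from rfl,
      show ("971" : String).toList = ['9', '7', '1'] from rfl,
      show ("966" : String).toList = ['9', '6', '6'] from rfl,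
      show ("65" : String).toList = ['6', '5'] from rfl,
      show ("60" : String).toList = ['6', '0'] from rfl,
      show ("852" : String).toList = ['8', '5', '2'] from rfl,
      show ("61" : String).toList = ['6', '1'] from rfl,
      show ("64" : String).toList = ['6', '4'] from rfl,
      show ("49" : String).toList = ['4', '9'] from rfl,
      show ("33" : String).toList = ['3', '3'] from rfl,
      show ("39" : String).toList = ['3', '9'] from rfl,
      show ("81" : String).toList = ['8', '1'] from rfl,
      show ("86" : String).toList = ['8', '6'] from rfl,
      show ("82" : String).toList = ['8', '2'] from rfl,
      show ("66" : String).toList = ['6', '6'] from rfl,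
      show ("62" : String).toList = ['6', '2'] from rfl,
      show ("63" : String).toList = ['6', '3'] from rfl,
      show ("92" : String).toList = ['9', '2'] from rfl,
      show ("94" : String).toList = ['9', '4'] from rfl,
      show ("880" : String).toList = ['8', '8', '0'] from rfl,
      show ("977" : String).toList = ['9', '7', '7'] from rfl,
      show ("974" : String).toList = ['9', '7', '4'] from rfl,
      show ("968" : String).toList = ['9', '6', '8'] from rfl,
      show ("973" : String).toList = ['9', '7', '3'] from rfl,
      show ("965" : String).toList = ['9', '6', '5'] from rfl,
      show ("254" : String).toList = ['2', '5', '4'] from rfl,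
      show ("27" : String).toList = ['2', '7'] from rfl,
      show ("234" : String).toList = ['2', '3', '4'] from rfl,
      show ("55" : String).toList = ['5', '5'] from rfl,
      show ("52" : String).toList = ['5', '2'] from rfl,
    and_true]
  by_cases h1 : a = '1'
  · subst h1; simp [eq_comm]
  by_cases h2 : a = '2'
  · subst h2; simp [eq_comm]
  by_cases h3 : a = '3'
  · subst h3; simp [eq_comm]
  by_cases h4 : a = '4'
  · subst h4; simp [eq_comm]
  by_cases h5 : a = '5'
  · subst h5; simp [eq_comm]
  by_cases h6 : a = '6'
  · subst h6; simp [eq_comm]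
  by_cases h7 : a = '7'
  · subst h7; simp [eq_comm]
  by_cases h8 : a = '8'
  · subst h8; simp [eq_comm]
  by_cases h9 : a = '9'
  · subst h9; simp [eq_comm]
  simp [h1, Ne.symm h1, h2, Ne.symm h2, h3, Ne.symm h3, h4, Ne.symm h4, h5, Ne.symm h5, h6, Ne.symm h6, h7, Ne.symm h7, h8, Ne.symm h8, h9, Ne.symm h9]

-- A's sorted scan equals B's decision tree, on a cleaned string of this shape
theorem pvShape2 (a b : Char) :
    pvScanA (String.ofList ([a, b])) (PySem.List.sorted pvPhoneTimezoneMap (fun x => -(PySem.Str.len x.1 : Int)) false)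
      = (fun phone => 
          let c := PySem.Str.slice phone none (some 1)
          if c == "1" then "America/New_York"
          else if c == "7" then "Europe/Moscow"
          else if c == "2" then
            let t3 := PySem.Str.slice phone none (some 3)
            if t3 == "254" then "Africa/Nairobi"
            else if t3 == "234" then "Africa/Lagos"
            else if PySem.Str.slice phone none (some 2) == "27" then "Africa/Johannesburg"
            else "Asia/Kolkata"
          else if c == "3" then
            let t2 := PySem.Str.slice phone none (some 2)
            if t2 == "33" then "Europe/Paris"
            else if t2 == "39" then "Europe/Rome"
            else "Asia/Kolkata"
          else if c == "4" then
            let t2 := PySem.Str.slice phone none (some 2)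
            if t2 == "44" then "Europe/London"
            else if t2 == "49" then "Europe/Berlin"
            else "Asia/Kolkata"
          else if c == "5" then
            let t2 := PySem.Str.slice phone none (some 2)
            if t2 == "55" then "America/Sao_Paulo"
            else if t2 == "52" then "America/Mexico_City"
            else "Asia/Kolkata"
          else if c == "6" then
            let t2 := PySem.Str.slice phone none (some 2)
            if t2 == "65" then "Asia/Singapore"
            else if t2 == "60" then "Asia/Kuala_Lumpur"
            else if t2 == "61" then "Australia/Sydney"
            else if t2 == "64" then "Pacific/Auckland"
            else if t2 == "66" then "Asia/Bangkok"
            else if t2 == "62" then "Asia/Jakarta"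
            else if t2 == "63" then "Asia/Manila"
            else "Asia/Kolkata"
          else if c == "8" then
            let t3 := PySem.Str.slice phone none (some 3)
            if t3 == "852" then "Asia/Hong_Kong"
            else if t3 == "880" then "Asia/Dhaka"
            else
              let t2 := PySem.Str.slice phone none (some 2)
              if t2 == "81" then "Asia/Tokyo"
              else if t2 == "86" then "Asia/Shanghai"
              else if t2 == "82" then "Asia/Seoul"
              else "Asia/Kolkata"
          else if c == "9" then
            let t3 := PySem.Str.slice phone none (some 3)
            if t3 == "971" then "Asia/Dubai"
            else if t3 == "966" then "Asia/Riyadh"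
            else if t3 == "977" then "Asia/Kathmandu"
            else if t3 == "974" then "Asia/Qatar"
            else if t3 == "968" then "Asia/Muscat"
            else if t3 == "973" then "Asia/Bahrain"
            else if t3 == "965" then "Asia/Kuwait"
            else
              let t2 := PySem.Str.slice phone none (some 2)
              if t2 == "91" then "Asia/Kolkata"
              else if t2 == "92" then "Asia/Karachi"
              else if t2 == "94" then "Asia/Colombo"
              else "Asia/Kolkata"
          else "Asia/Kolkata") (String.ofList ([a, b])) := by
  simp only [pvSorted_eval, pvSlice1, pvSlice2, pvSlice3, String.toList_ofList,
    List.take_succ_cons, List.take_zero, List.take_nil]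
  simp only [pvScanA, sw_startswith_prefix, beq_eq_toList, String.toList_ofList,
    decide_eq_true_eq, List.cons_prefix_cons, List.nil_prefix, List.prefix_nil, List.cons.injEq,
    show ("1" : String).toList = ['1'] from rfl,
      show ("7" : String).toList = ['7'] from rfl,
      show ("2" : String).toList = ['2'] from rfl,
      show ("3" : String).toList = ['3'] from rfl,
      show ("4" : String).toList = ['4'] from rfl,
      show ("5" : String).toList = ['5'] from rfl,
      show ("6" : String).toList = ['6'] from rfl,
      show ("8" : String).toList = ['8'] from rfl,
      show ("9" : String).toList = ['9'] from rfl,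
      show ("91" : String).toList = ['9', '1'] from rfl,
      show ("44" : String).toList = ['4', '4'] from rfl,
      show ("971" : String).toList = ['9', '7', '1'] from rfl,
      show ("966" : String).toList = ['9', '6', '6'] from rfl,
      show ("65" : String).toList = ['6', '5'] from rfl,
      show ("60" : String).toList = ['6', '0'] from rfl,
      show ("852" : String).toList = ['8', '5', '2'] from rfl,
      show ("61" : String).toList = ['6', '1'] from rfl,
      show ("64" : String).toList = ['6', '4'] from rfl,
      show ("49" : String).toList = ['4', '9'] from rfl,
      show ("33" : String).toList = ['3', '3'] from rfl,
      show ("39" : String).toList = ['3', '9'] from rfl,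
      show ("81" : String).toList = ['8', '1'] from rfl,
      show ("86" : String).toList = ['8', '6'] from rfl,
      show ("82" : String).toList = ['8', '2'] from rfl,
      show ("66" : String).toList = ['6', '6'] from rfl,
      show ("62" : String).toList = ['6', '2'] from rfl,
      show ("63" : String).toList = ['6', '3'] from rfl,
      show ("92" : String).toList = ['9', '2'] from rfl,
      show ("94" : String).toList = ['9', '4'] from rfl,
      show ("880" : String).toList = ['8', '8', '0'] from rfl,
      show ("977" : String).toList = ['9', '7', '7'] from rfl,
      show ("974" : String).toList = ['9', '7', '4'] from rfl,
      show ("968" : String).toList = ['9', '6', '8'] from rfl,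
      show ("973" : String).toList = ['9', '7', '3'] from rfl,
      show ("965" : String).toList = ['9', '6', '5'] from rfl,
      show ("254" : String).toList = ['2', '5', '4'] from rfl,
      show ("27" : String).toList = ['2', '7'] from rfl,
      show ("234" : String).toList = ['2', '3', '4'] from rfl,
      show ("55" : String).toList = ['5', '5'] from rfl,
      show ("52" : String).toList = ['5', '2'] from rfl,
    and_true, reduceCtorEq, and_false, if_false]
  by_cases h1 : a = '1'
  · subst h1; simp [eq_comm]
  by_cases h2 : a = '2'
  · subst h2; simp [eq_comm]
  by_cases h3 : a = '3'
  · subst h3; simp [eq_comm]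
  by_cases h4 : a = '4'
  · subst h4; simp [eq_comm]
  by_cases h5 : a = '5'
  · subst h5; simp [eq_comm]
  by_cases h6 : a = '6'
  · subst h6; simp [eq_comm]
  by_cases h7 : a = '7'
  · subst h7; simp [eq_comm]
  by_cases h8 : a = '8'
  · subst h8; simp [eq_comm]
  by_cases h9 : a = '9'
  · subst h9; simp [eq_comm]
  simp [h1, Ne.symm h1, h2, Ne.symm h2, h3, Ne.symm h3, h4, Ne.symm h4, h5, Ne.symm h5, h6, Ne.symm h6, h7, Ne.symm h7, h8, Ne.symm h8, h9, Ne.symm h9]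

-- A's sorted scan equals B's decision tree, on a cleaned string of this shape
theorem pvShape1 (a : Char) :
    pvScanA (String.ofList ([a])) (PySem.List.sorted pvPhoneTimezoneMap (fun x => -(PySem.Str.len x.1 : Int)) false)
      = (fun phone => 
          let c := PySem.Str.slice phone none (some 1)
          if c == "1" then "America/New_York"
          else if c == "7" then "Europe/Moscow"
          else if c == "2" then
            let t3 := PySem.Str.slice phone none (some 3)
            if t3 == "254" then "Africa/Nairobi"
            else if t3 == "234" then "Africa/Lagos"
            else if PySem.Str.slice phone none (some 2) == "27" then "Africa/Johannesburg"
            else "Asia/Kolkata"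
          else if c == "3" then
            let t2 := PySem.Str.slice phone none (some 2)
            if t2 == "33" then "Europe/Paris"
            else if t2 == "39" then "Europe/Rome"
            else "Asia/Kolkata"
          else if c == "4" then
            let t2 := PySem.Str.slice phone none (some 2)
            if t2 == "44" then "Europe/London"
            else if t2 == "49" then "Europe/Berlin"
            else "Asia/Kolkata"
          else if c == "5" then
            let t2 := PySem.Str.slice phone none (some 2)
            if t2 == "55" then "America/Sao_Paulo"
            else if t2 == "52" then "America/Mexico_City"
            else "Asia/Kolkata"
          else if c == "6" then
            let t2 := PySem.Str.slice phone none (some 2)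
            if t2 == "65" then "Asia/Singapore"
            else if t2 == "60" then "Asia/Kuala_Lumpur"
            else if t2 == "61" then "Australia/Sydney"
            else if t2 == "64" then "Pacific/Auckland"
            else if t2 == "66" then "Asia/Bangkok"
            else if t2 == "62" then "Asia/Jakarta"
            else if t2 == "63" then "Asia/Manila"
            else "Asia/Kolkata"
          else if c == "8" then
            let t3 := PySem.Str.slice phone none (some 3)
            if t3 == "852" then "Asia/Hong_Kong"
            else if t3 == "880" then "Asia/Dhaka"
            else
              let t2 := PySem.Str.slice phone none (some 2)
              if t2 == "81" then "Asia/Tokyo"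
              else if t2 == "86" then "Asia/Shanghai"
              else if t2 == "82" then "Asia/Seoul"
              else "Asia/Kolkata"
          else if c == "9" then
            let t3 := PySem.Str.slice phone none (some 3)
            if t3 == "971" then "Asia/Dubai"
            else if t3 == "966" then "Asia/Riyadh"
            else if t3 == "977" then "Asia/Kathmandu"
            else if t3 == "974" then "Asia/Qatar"
            else if t3 == "968" then "Asia/Muscat"
            else if t3 == "973" then "Asia/Bahrain"
            else if t3 == "965" then "Asia/Kuwait"
            else
              let t2 := PySem.Str.slice phone none (some 2)
              if t2 == "91" then "Asia/Kolkata"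
              else if t2 == "92" then "Asia/Karachi"
              else if t2 == "94" then "Asia/Colombo"
              else "Asia/Kolkata"
          else "Asia/Kolkata") (String.ofList ([a])) := by
  simp only [pvSorted_eval, pvSlice1, pvSlice2, pvSlice3, String.toList_ofList,
    List.take_succ_cons, List.take_nil]
  simp only [pvScanA, sw_startswith_prefix, beq_eq_toList, String.toList_ofList,
    decide_eq_true_eq, List.cons_prefix_cons, List.prefix_nil, List.cons.injEq,
    show ("1" : String).toList = ['1'] from rfl,
      show ("7" : String).toList = ['7'] from rfl,
      show ("2" : String).toList = ['2'] from rfl,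
      show ("3" : String).toList = ['3'] from rfl,
      show ("4" : String).toList = ['4'] from rfl,
      show ("5" : String).toList = ['5'] from rfl,
      show ("6" : String).toList = ['6'] from rfl,
      show ("8" : String).toList = ['8'] from rfl,
      show ("9" : String).toList = ['9'] from rfl,
      show ("91" : String).toList = ['9', '1'] from rfl,
      show ("44" : String).toList = ['4', '4'] from rfl,
      show ("971" : String).toList = ['9', '7', '1'] from rfl,
      show ("966" : String).toList = ['9', '6', '6'] from rfl,
      show ("65" : String).toList = ['6', '5'] from rfl,
      show ("60" : String).toList = ['6', '0'] from rfl,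
      show ("852" : String).toList = ['8', '5', '2'] from rfl,
      show ("61" : String).toList = ['6', '1'] from rfl,
      show ("64" : String).toList = ['6', '4'] from rfl,
      show ("49" : String).toList = ['4', '9'] from rfl,
      show ("33" : String).toList = ['3', '3'] from rfl,
      show ("39" : String).toList = ['3', '9'] from rfl,
      show ("81" : String).toList = ['8', '1'] from rfl,
      show ("86" : String).toList = ['8', '6'] from rfl,
      show ("82" : String).toList = ['8', '2'] from rfl,
      show ("66" : String).toList = ['6', '6'] from rfl,
      show ("62" : String).toList = ['6', '2'] from rfl,
      show ("63" : String).toList = ['6', '3'] from rfl,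
      show ("92" : String).toList = ['9', '2'] from rfl,
      show ("94" : String).toList = ['9', '4'] from rfl,
      show ("880" : String).toList = ['8', '8', '0'] from rfl,
      show ("977" : String).toList = ['9', '7', '7'] from rfl,
      show ("974" : String).toList = ['9', '7', '4'] from rfl,
      show ("968" : String).toList = ['9', '6', '8'] from rfl,
      show ("973" : String).toList = ['9', '7', '3'] from rfl,
      show ("965" : String).toList = ['9', '6', '5'] from rfl,
      show ("254" : String).toList = ['2', '5', '4'] from rfl,
      show ("27" : String).toList = ['2', '7'] from rfl,
      show ("234" : String).toList = ['2', '3', '4'] from rfl,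
      show ("55" : String).toList = ['5', '5'] from rfl,
      show ("52" : String).toList = ['5', '2'] from rfl,
    and_true, reduceCtorEq, and_false, if_false]
  by_cases h1 : a = '1'
  · subst h1; simp
  by_cases h2 : a = '2'
  · subst h2; simp [eq_comm]
  by_cases h3 : a = '3'
  · subst h3; simp [eq_comm]
  by_cases h4 : a = '4'
  · subst h4; simp [eq_comm]
  by_cases h5 : a = '5'
  · subst h5; simp [eq_comm]
  by_cases h6 : a = '6'
  · subst h6; simp [eq_comm]
  by_cases h7 : a = '7'
  · subst h7; simp [eq_comm]
  by_cases h8 : a = '8'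
  · subst h8; simp [eq_comm]
  by_cases h9 : a = '9'
  · subst h9; simp [eq_comm]
  simp [h1, Ne.symm h1, h2, h3, h4, h5, h6, h7, Ne.symm h7, h8, h9]

-- the heart: on any character list, A's sorted startswith scan = B's first-digit decision tree
theorem pvCore (l : List Char) :
    pvScanA (String.ofList l) (PySem.List.sorted pvPhoneTimezoneMap (fun x => -(PySem.Str.len x.1 : Int)) false)
      = (fun phone =>
          let c := PySem.Str.slice phone none (some 1)
          if c == "1" then "America/New_York"
          else if c == "7" then "Europe/Moscow"
          else if c == "2" then
            let t3 := PySem.Str.slice phone none (some 3)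
            if t3 == "254" then "Africa/Nairobi"
            else if t3 == "234" then "Africa/Lagos"
            else if PySem.Str.slice phone none (some 2) == "27" then "Africa/Johannesburg"
            else "Asia/Kolkata"
          else if c == "3" then
            let t2 := PySem.Str.slice phone none (some 2)
            if t2 == "33" then "Europe/Paris"
            else if t2 == "39" then "Europe/Rome"
            else "Asia/Kolkata"
          else if c == "4" then
            let t2 := PySem.Str.slice phone none (some 2)
            if t2 == "44" then "Europe/London"
            else if t2 == "49" then "Europe/Berlin"
            else "Asia/Kolkata"
          else if c == "5" then
            let t2 := PySem.Str.slice phone none (some 2)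
            if t2 == "55" then "America/Sao_Paulo"
            else if t2 == "52" then "America/Mexico_City"
            else "Asia/Kolkata"
          else if c == "6" then
            let t2 := PySem.Str.slice phone none (some 2)
            if t2 == "65" then "Asia/Singapore"
            else if t2 == "60" then "Asia/Kuala_Lumpur"
            else if t2 == "61" then "Australia/Sydney"
            else if t2 == "64" then "Pacific/Auckland"
            else if t2 == "66" then "Asia/Bangkok"
            else if t2 == "62" then "Asia/Jakarta"
            else if t2 == "63" then "Asia/Manila"
            else "Asia/Kolkata"
          else if c == "8" then
            let t3 := PySem.Str.slice phone none (some 3)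
            if t3 == "852" then "Asia/Hong_Kong"
            else if t3 == "880" then "Asia/Dhaka"
            else
              let t2 := PySem.Str.slice phone none (some 2)
              if t2 == "81" then "Asia/Tokyo"
              else if t2 == "86" then "Asia/Shanghai"
              else if t2 == "82" then "Asia/Seoul"
              else "Asia/Kolkata"
          else if c == "9" then
            let t3 := PySem.Str.slice phone none (some 3)
            if t3 == "971" then "Asia/Dubai"
            else if t3 == "966" then "Asia/Riyadh"
            else if t3 == "977" then "Asia/Kathmandu"
            else if t3 == "974" then "Asia/Qatar"
            else if t3 == "968" then "Asia/Muscat"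
            else if t3 == "973" then "Asia/Bahrain"
            else if t3 == "965" then "Asia/Kuwait"
            else
              let t2 := PySem.Str.slice phone none (some 2)
              if t2 == "91" then "Asia/Kolkata"
              else if t2 == "92" then "Asia/Karachi"
              else if t2 == "94" then "Asia/Colombo"
              else "Asia/Kolkata"
          else "Asia/Kolkata") (String.ofList l) := by
  rcases l with _ | ⟨a, _ | ⟨b, _ | ⟨d, t⟩⟩⟩
  · decide
  · exact pvShape1 a
  · exact pvShape2 a b
  · exact pvShape3 a b d t

-- ===== VERDICT (by name: the statement is the Claim_ definition above) =====
theorem detect_timezone_from_phone_spec : Claim_equal_detect_timezone_from_phone := by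
  intro phone _
  unfold Spec_detect_timezone_from_phone detect_timezone_from_phone detect_timezone_from_phone_alt
  have h := pvCore (pvClean phone).toList
  rw [String.ofList_toList] at h
  exact h
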